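-- pv_equiv track=rewrite | github.com/suhanisurya17/code-sync | leetcode/findLongestRun.py | findLongestRun
-- ===== SOURCE A (Python) =====
-- def findLongestRun(runLogs):
--     if not runLogs:
--         return ''
--
--     # Dictionary to store the longest run for each process
--     longest_runs = {}
--
--     # Start with the first process
--     current_process = runLogs[0][0]
--     start_time = runLogs[0][1]
--
--     # Iterate through the logs
--     for i in range(1, len(runLogs)):
--         process_id = runLogs[i][0]
--         end_time = runLogs[i][1]
--
--         # If process changed, calculate the run duration
--         if process_id != current_process:
--             run_duration = end_time - start_time
--
--             # Update longest run for this process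
--             if current_process not in longest_runs:
--                 longest_runs[current_process] = run_duration
--             else:
--                 longest_runs[current_process] = max(longest_runs[current_process], run_duration)
--
--             # Start tracking the new process
--             current_process = process_id
--             start_time = end_time
--
--     # Don't forget the last process run
--     # It runs until the end time of the last log entry
--     final_end_time = runLogs[-1][1]
--     run_duration = final_end_time - start_time
--
--     if current_process not in longest_runs:
--         longest_runs[current_process] = run_duration
--     else:
--         longest_runs[current_process] = max(longest_runs[current_process], run_duration)
--
--     # Find the process with the longest run
--     max_process = max(longest_runs, key=longest_runs.get)
--
--     # Convert process number to character (0 -> 'a', 1 -> 'b', etc.)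
--     return chr(ord('a') + max_process)
-- ===== SOURCE B (Python) =====
-- def findLongestRun(runLogs):
--     if not runLogs:
--         return ''
--     # Pass 1: collect run segments — (process_id, first_time) of each consecutive block
--     segs = []
--     for log in runLogs:
--         pid, t = log[0], log[1]
--         if not segs or segs[-1][0] != pid:
--             segs.append((pid, t))
--     # each segment ends where the next one begins; the last ends at the final log's time
--     bounds = [s[1] for s in segs[1:]] + [runLogs[-1][1]]
--     # Pass 2: fold segment durations into a per-process max dict, in segment order
--     best = {}
--     for (pid, start), end in zip(segs, bounds):
--         d = end - start
--         if pid in best: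
--             if d > best[pid]:
--                 best[pid] = d
--         else:
--             best[pid] = d
--     # first key reaching the maximum value wins (dict insertion order)
--     winner, top = None, None
--     for pid, d in best.items():
--         if top is None or d > top:
--             winner, top = pid, d
--     return chr(ord('a') + winner)
-- ===== Notes on version B (the rewrite author's own statement) =====
-- stated objective: alternative
-- what changed: Replaces A's single streaming scan (carrying current process and start time and updating the dict mid-loop) by a two-pass decomposition: pass 1 collects the (process, first_time) head of each consecutive block, pass 2 zips these segments with their end boundaries and folds durations into the per-process max dict, followed by an explicit first-strict-max argmax loop over the dict items.
-- outside the precondition, e.g. on findLongestRun([[9999999, 0], [0, 1], [0, 9]]): A returns 'a', B returns 'a'; on findLongestRun([[70000000, 0], [0, 5]]): A raises ValueError, B raises ValueError; on findLongestRun([[1], [0, 5]]): A raises IndexError, B raises IndexError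
import Mathlib
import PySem

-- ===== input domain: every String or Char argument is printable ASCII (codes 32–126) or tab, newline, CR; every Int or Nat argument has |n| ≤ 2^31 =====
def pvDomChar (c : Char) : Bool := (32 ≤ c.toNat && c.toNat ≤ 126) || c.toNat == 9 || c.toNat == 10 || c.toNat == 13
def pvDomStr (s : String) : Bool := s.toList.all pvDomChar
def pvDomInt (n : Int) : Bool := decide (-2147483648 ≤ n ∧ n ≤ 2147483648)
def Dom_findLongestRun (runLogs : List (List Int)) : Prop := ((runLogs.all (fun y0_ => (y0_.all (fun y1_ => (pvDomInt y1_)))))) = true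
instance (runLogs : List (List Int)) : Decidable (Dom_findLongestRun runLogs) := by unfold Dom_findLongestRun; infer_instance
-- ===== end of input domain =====

-- B replaces A's single streaming scan (current process / start time carried through the loop) by a
-- two-pass decomposition: first collect the (process, first_time) head of every consecutive block,
-- then fold segment durations (next boundary − start) into the per-process max dict; same cost, alternative shape.

-- ===== PORT A =====
-- longest_runs[k] = v  /  max(longest_runs[k], v), guarded by 'k not in longest_runs'
def aUpd (d : PySem.Dict Int Int) (k v : Int) : PySem.Dict Int Int :=
  if d.contains k = false then d.insert k v else d.insert k (max (d.getD k 0) v)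

-- the body of A's for-loop; state = (longest_runs, current_process, start_time)
def aStep (st : PySem.Dict Int Int × Int × Int) (log : List Int) :
    PySem.Dict Int Int × Int × Int :=
  let p := PySem.List.pyGetD log 0 0
  let t := PySem.List.pyGetD log 1 0
  if p ≠ st.2.1 then (aUpd st.1 st.2.1 (t - st.2.2), p, t) else st

def findLongestRun (runLogs : List (List Int)) : String :=
  if runLogs = [] then "" else
    let first := PySem.List.pyGetD runLogs 0 []
    let init : PySem.Dict Int Int × Int × Int :=
      (PySem.Dict.empty, PySem.List.pyGetD first 0 0, PySem.List.pyGetD first 1 0)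
    let st := (PySem.List.pyRange 1 (PySem.List.len runLogs)).foldl
      (fun st i => aStep st (PySem.List.pyGetD runLogs i [])) init
    let finalEnd := PySem.List.pyGetD (PySem.List.pyGetD runLogs (-1) []) 1 0
    let d := aUpd st.1 st.2.1 (finalEnd - st.2.2)
    match PySem.List.max? d.keys (fun k => d.getD k 0) with
    | some p => String.ofList [Char.ofNat (97 + p).toNat]
    | none => ""

-- ===== PORT B =====
-- best[pid] = d only when new or strictly larger (Source B's update)
def bUpd (d : PySem.Dict Int Int) (k v : Int) : PySem.Dict Int Int :=
  if d.contains k = true then (if v > d.getD k 0 then d.insert k v else d) else d.insert k v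

-- pass 1 of Source B: consecutive block heads (pid, first_time)
def bSegs (runLogs : List (List Int)) : List (Int × Int) :=
  runLogs.foldl
    (fun segs log =>
      let p := PySem.List.pyGetD log 0 0
      let t := PySem.List.pyGetD log 1 0
      match segs.getLast? with
      | none => segs ++ [(p, t)]
      | some last => if last.1 ≠ p then segs ++ [(p, t)] else segs) []

def findLongestRun_alt (runLogs : List (List Int)) : String :=
  if runLogs = [] then "" else
    let segs := bSegs runLogs
    let bounds := (PySem.List.slice segs (some 1)).map (fun s => s.2)
      ++ [PySem.List.pyGetD (PySem.List.pyGetD runLogs (-1) []) 1 0]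
    let best := (segs.zip bounds).foldl (fun d pe => bUpd d pe.1.1 (pe.2 - pe.1.2)) PySem.Dict.empty
    let w := best.items.foldl
      (fun acc pd =>
        match acc with
        | none => some pd
        | some wt => if pd.2 > wt.2 then some pd else acc) none
    match w with
    | some wt => String.ofList [Char.ofNat (97 + wt.1).toNat]
    | none => ""

-- ===== PRECONDITION & SPEC =====
-- Pre_ excludes inputs on which A raises: a log with fewer than 2 entries (IndexError) and process
-- ids for which chr(97+pid) raises ValueError or yields a lone surrogate (not a Lean String value);
-- the pid bound is checked for every log, slightly narrower than the single winning pid A converts.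
def Pre_findLongestRun (runLogs : List (List Int)) : Prop :=
  ∀ log ∈ runLogs, 2 ≤ log.length ∧
    (-97 ≤ log.headD 0 ∧ log.headD 0 + 97 < 55296 ∨
      57344 ≤ log.headD 0 + 97 ∧ log.headD 0 + 97 < 1114112)
instance (runLogs : List (List Int)) : Decidable (Pre_findLongestRun runLogs) := by
  unfold Pre_findLongestRun; infer_instance

def pvWitness_findLongestRun : List (List Int) := [[0, 0], [1, 3], [0, 4], [0, 9]]

def Spec_findLongestRun (runLogs : List (List Int)) (out : String) : Prop := out = findLongestRun_alt runLogs
instance (runLogs : List (List Int)) (out : String) : Decidable (Spec_findLongestRun runLogs out) := by unfold Spec_findLongestRun; infer_instance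

-- ===== CLAIM (what is proved, stated in full; the proofs are below) =====
def Claim_equal_findLongestRun : Prop := ∀ (runLogs : List (List Int)), Dom_findLongestRun runLogs → Pre_findLongestRun runLogs → Spec_findLongestRun runLogs (findLongestRun runLogs)

-- ===== LEMMAS AND PROOFS =====

-- recursive characterisation of the block heads after the first block (proof-side only)
def tailSegs (c : Int) : List (List Int) → List (Int × Int)
  | [] => []
  | log :: r =>
    let p := PySem.List.pyGetD log 0 0
    let t := PySem.List.pyGetD log 1 0
    if p ≠ c then (p, t) :: tailSegs p r else tailSegs c r

lemma insert_getD_self (d : PySem.Dict Int Int) (k : Int)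
    (hc : d.contains k = true) (hnd : d.keys.Nodup) :
    d.insert k (d.getD k 0) = d := by
  apply PySem.Dict.ext
  rw [PySem.Dict.items_insert_of_contains d _ hc]
  conv_rhs => rw [← List.map_id d.items]
  apply List.map_congr_left
  intro p hp
  by_cases h : p.1 = k
  · have hmem : (k, p.2) ∈ d.items := by rwa [← h, Prod.mk.eta]
    have hv := PySem.Dict.getD_of_mem_items d hmem hnd 0
    simp only [h, BEq.rfl, if_true, id, hv]
    rw [← h, Prod.mk.eta]
  · simp [h]

lemma upd_eq (d : PySem.Dict Int Int) (k v : Int) (hnd : d.keys.Nodup) :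
    aUpd d k v = bUpd d k v := by
  unfold aUpd bUpd
  by_cases hc : d.contains k = true
  · simp only [hc, if_true]
    rw [if_neg (by simp)]
    by_cases hv : v > d.getD k 0
    · rw [if_pos hv, max_eq_right (le_of_lt hv)]
    · rw [if_neg hv, max_eq_left (not_lt.mp hv), insert_getD_self d k hc hnd]
  · have hc' : d.contains k = false := by simpa using hc
    rw [if_pos hc', if_neg (by simp [hc'])]

lemma aUpd_nodup (d : PySem.Dict Int Int) (k v : Int) (hnd : d.keys.Nodup) :
    (aUpd d k v).keys.Nodup := by
  unfold aUpd; split_ifs <;> exact PySem.Dict.nodup_keys_insert d _ _ hnd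

lemma aFold_nodup (rest : List (List Int)) (d : PySem.Dict Int Int) (c s : Int)
    (hnd : d.keys.Nodup) : (rest.foldl aStep (d, c, s)).1.keys.Nodup := by
  induction rest generalizing d c s with
  | nil => exact hnd
  | cons log r ih =>
    simp only [List.foldl_cons]
    simp only [aStep]
    split_ifs with h
    · exact ih _ _ _ (aUpd_nodup d c _ hnd)
    · exact ih _ _ _ hnd

-- the A-loop followed by the final update equals B's duration fold over the segments
lemma main_fold (rest : List (List Int)) (d : PySem.Dict Int Int) (c s T : Int)
    (hnd : d.keys.Nodup) :
    (fun st => aUpd st.1 st.2.1 (T - st.2.2)) (rest.foldl aStep (d, c, s))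
      = (((c, s) :: tailSegs c rest).zip ((tailSegs c rest).map (fun x => x.2) ++ [T])).foldl
          (fun d pe => bUpd d pe.1.1 (pe.2 - pe.1.2)) d := by
  induction rest generalizing d c s with
  | nil =>
    simp only [List.foldl_nil, tailSegs, List.map_nil, List.nil_append, List.zip_cons_cons,
      List.zip_nil_left, List.foldl_cons]
    exact upd_eq d c (T - s) hnd
  | cons log r ih =>
    simp only [List.foldl_cons]
    simp only [aStep]
    unfold tailSegs
    by_cases hp : PySem.List.pyGetD log 0 0 ≠ c
    · rw [if_pos hp, if_pos hp]
      simp only [List.map_cons, List.cons_append, List.zip_cons_cons, List.foldl_cons]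
      rw [← upd_eq d c (PySem.List.pyGetD log 1 0 - s) hnd]
      exact ih (aUpd d c _) _ _ (aUpd_nodup d c _ hnd)
    · rw [if_neg hp, if_neg hp]
      exact ih d c s hnd

-- B's explicit first-strict-max loop over items = A's max(keys, key=get), given unique keys
lemma argmax_fold (ks : List Int) (d : PySem.Dict Int Int) (acc : Option Int) :
    (ks.foldl
        (fun acc k =>
          match acc with
          | none => some (k, d.getD k 0)
          | some wt => if d.getD k 0 > wt.2 then some (k, d.getD k 0) else acc)
        (acc.map (fun k => (k, d.getD k 0)))).map (fun x => x.1)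
      = ks.foldl
          (fun acc x =>
            match acc with
            | none => some x
            | some m => if d.getD m 0 < d.getD x 0 then some x else some m) acc := by
  induction ks generalizing acc with
  | nil => cases acc <;> rfl
  | cons k t ih =>
    cases acc with
    | none => exact ih (some k)
    | some m =>
      simp only [List.foldl_cons, Option.map_some]
      by_cases h : d.getD m 0 < d.getD k 0
      · simpa [h, gt_iff_lt] using ih (some k)
      · simpa [h, gt_iff_lt] using ih (some m)

lemma map_fst_match (oB : Option (Int × Int)) :
    (match oB.map (fun x => x.1) with
      | some p => String.ofList [Char.ofNat (97 + p).toNat]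
      | none => "")
    = (match oB with
      | some wt => String.ofList [Char.ofNat (97 + wt.1).toNat]
      | none => "") := by
  cases oB <;> rfl

lemma final_eq (d : PySem.Dict Int Int) (hnd : d.keys.Nodup) :
    (match PySem.List.max? d.keys (fun k => d.getD k 0) with
      | some p => String.ofList [Char.ofNat (97 + p).toNat]
      | none => "")
    = (match d.items.foldl
          (fun acc pd =>
            match acc with
            | none => some pd
            | some wt => if pd.2 > wt.2 then some pd else acc) none with
      | some wt => String.ofList [Char.ofNat (97 + wt.1).toNat]
      | none => "") := by
  have h := argmax_fold d.keys d none
  simp only [Option.map_none] at h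
  rw [PySem.Dict.items_eq_map_keys d hnd 0, List.foldl_map]
  show (match PySem.List.max? d.keys (fun k => d.getD k 0) with
        | some p => String.ofList [Char.ofNat (97 + p).toNat]
        | none => "")
      = (match List.foldl
            (fun acc k =>
              match acc with
              | none => some (k, d.getD k 0)
              | some wt => if d.getD k 0 > wt.2 then some (k, d.getD k 0) else acc)
            none d.keys with
        | some wt => String.ofList [Char.ofNat (97 + wt.1).toNat]
        | none => "")
  have hmax : PySem.List.max? d.keys (fun k => d.getD k 0)
      = List.foldl
          (fun acc x =>
            match acc with
            | none => some x
            | some m => if d.getD m 0 < d.getD x 0 then some x else some m) none d.keys := by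
    unfold PySem.List.max?
    congr 1
    funext acc x
    cases acc <;> rfl
  rw [hmax, ← h]
  exact map_fst_match _

-- bSegs as [(p0,t0)] ++ tailSegs
lemma bSegs_aux (rest : List (List Int)) (acc : List (Int × Int)) (c s : Int)
    (h : acc.getLast? = some (c, s)) :
    rest.foldl
        (fun segs log =>
          let p := PySem.List.pyGetD log 0 0
          let t := PySem.List.pyGetD log 1 0
          match segs.getLast? with
          | none => segs ++ [(p, t)]
          | some last => if last.1 ≠ p then segs ++ [(p, t)] else segs) acc
      = acc ++ tailSegs c rest := by
  induction rest generalizing acc c s with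
  | nil => simp [tailSegs]
  | cons log r ih =>
    simp only [List.foldl_cons]
    rw [tailSegs]
    rw [h]
    by_cases hp : PySem.List.pyGetD log 0 0 ≠ c
    · rw [if_pos hp]
      have hc : (c, s).1 ≠ PySem.List.pyGetD log 0 0 := fun he => hp he.symm
      simp only [if_pos hc]
      rw [ih (acc ++ [(PySem.List.pyGetD log 0 0, PySem.List.pyGetD log 1 0)])
        (PySem.List.pyGetD log 0 0) (PySem.List.pyGetD log 1 0) (by simp),
        List.append_assoc, List.singleton_append]
    · rw [if_neg hp]
      have hc : ¬ (c, s).1 ≠ PySem.List.pyGetD log 0 0 := by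
        simp only [ne_eq, not_not] at hp ⊢; exact hp.symm
      simp only [hc]
      exact ih acc c s h

lemma bSegs_cons (l : List Int) (rest : List (List Int)) :
    bSegs (l :: rest)
      = (PySem.List.pyGetD l 0 0, PySem.List.pyGetD l 1 0)
          :: tailSegs (PySem.List.pyGetD l 0 0) rest := by
  unfold bSegs
  simp only [List.foldl_cons, List.getLast?_nil, List.nil_append]
  exact bSegs_aux rest [(PySem.List.pyGetD l 0 0, PySem.List.pyGetD l 1 0)]
    (PySem.List.pyGetD l 0 0) (PySem.List.pyGetD l 1 0) (by simp)

-- ===== VERDICT (by name: the statement is the Claim_ definition above) =====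
theorem findLongestRun_spec : Claim_equal_findLongestRun := by
  intro runLogs _ _
  unfold Spec_findLongestRun findLongestRun findLongestRun_alt
  cases runLogs with
  | nil => rfl
  | cons l rest =>
    simp only [reduceCtorEq, if_false]
    have hget0 : PySem.List.pyGetD (l :: rest) 0 [] = l := by
      simp [PySem.List.pyGetD]
    have hloop := PySem.List.foldl_pyRange_pyGetD' (l :: rest) [] aStep
      (PySem.Dict.empty, PySem.List.pyGetD l 0 0, PySem.List.pyGetD l 1 0)
      (a := 1) (by norm_num)
    have hdrop : ((1 : Int)).toNat = 1 := rfl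
    rw [hget0]
    simp only [PySem.List.len_eq] at *
    rw [hloop, hdrop, List.drop_one, List.tail_cons]
    rw [bSegs_cons, PySem.List.slice_from _ (by norm_num : (0:Int) ≤ 1), hdrop, List.drop_one,
      List.tail_cons]
    set T := PySem.List.pyGetD (PySem.List.pyGetD (l :: rest) (-1) []) 1 0 with hT
    rw [← main_fold rest PySem.Dict.empty (PySem.List.pyGetD l 0 0) (PySem.List.pyGetD l 1 0) T
      (by simp [PySem.Dict.keys_empty])]
    exact final_eq _ (aUpd_nodup _ _ _ (aFold_nodup rest PySem.Dict.empty _ _ (by simp [PySem.Dict.keys_empty])))
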